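-- pv_equiv track=rewrite | github.com/EchoedRadani/static-site-generator | src/block_markdown.py | is_ordered_list
-- ===== SOURCE A (Python) =====
-- def is_ordered_list(block):
--     check_lines = block.split("\n")
--     if len(check_lines) != 1:
--         return False
--     line = check_lines[0]
--     count = 0
--     for char in line:
--         if char.isdigit():
--             count += 1
--         else:
--             break
--     if len(line) <= count:
--         return False
--     if count == 0 or line[count] != ".":
--         return False
--     if not len(line) > count + 2:
--         return False
--     line_space = line[count + 1]
--     text = line[count + 2:]
--     if line_space != " ":
--         return False
--     return len(text.strip()) != 0
-- ===== SOURCE B (Python) =====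
-- def is_ordered_list(block):
--     if "\n" in block:
--         return False
--     num, sep, rest = block.partition(". ")
--     if not sep or not num.isdigit():
--         return False
--     return rest.strip() != ""
-- ===== Notes on version B (the rewrite author's own statement) =====
-- stated objective: idiomatic
-- what changed: B replaces A's split-into-lines length check and explicit leading-digit counting loop (with four staged index/length guards) by a newline membership test plus one str.partition at the ordered-list separator and num.isdigit()/rest.strip() predicate checks, maintaining no running counter.
import Mathlib
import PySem

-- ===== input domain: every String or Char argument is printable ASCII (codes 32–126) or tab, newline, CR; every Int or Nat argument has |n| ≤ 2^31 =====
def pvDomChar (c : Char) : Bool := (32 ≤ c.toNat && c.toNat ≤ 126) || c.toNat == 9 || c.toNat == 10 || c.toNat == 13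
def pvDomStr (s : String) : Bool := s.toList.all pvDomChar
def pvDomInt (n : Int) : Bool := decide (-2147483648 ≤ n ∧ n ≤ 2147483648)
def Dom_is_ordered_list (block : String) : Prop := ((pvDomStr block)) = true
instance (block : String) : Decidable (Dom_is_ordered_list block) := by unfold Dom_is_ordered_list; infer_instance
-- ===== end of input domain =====

-- B replaces A's explicit leading-digit counting loop by one str.partition('. ') plus
-- predicate checks (idiomatic decomposition; same linear cost).

-- ===== PORT A =====
-- the 'for char in line: count += 1 / break' loop of A
def pvDigitRunLen : List Char → Nat
  | [] => 0
  | c :: rest => if PySem.Chars.isdigit c then pvDigitRunLen rest + 1 else 0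

def is_ordered_list (block : String) : Bool :=
  let check_lines := PySem.Chars.splitOn block.toList "\n".toList
  if check_lines.length ≠ 1 then false
  else
    let line := check_lines.headD []
    let count := pvDigitRunLen line
    if line.length ≤ count then false
    else if count = 0 ∨ PySem.List.pyGet? line (count : Int) ≠ some '.' then false
    else if ¬ (line.length > count + 2) then false
    else
      let line_space := PySem.List.pyGet? line ((count : Int) + 1)
      let text := PySem.List.slice line (some ((count : Int) + 2)) none
      if line_space ≠ some ' ' then false
      else decide ((PySem.Chars.strip text).length ≠ 0)

-- ===== PORT B =====
-- 'num, sep, rest = block.partition(". ")' is ported as first-occurrence find + the two slices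
def is_ordered_list_alt (block : String) : Bool :=
  if PySem.Str.isIn "\n" block then false
  else
    let i := PySem.Str.find block ". "
    if i = -1 then false
    else
      let num := PySem.Str.slice block none (some i)
      let rest := PySem.Str.slice block (some (i + 2)) none
      if ¬ PySem.Str.strIsdigit num then false
      else decide (PySem.Str.strip rest ≠ "")

-- ===== PRECONDITION & SPEC =====
def Spec_is_ordered_list (block : String) (out : Bool) : Prop := out = is_ordered_list_alt block
instance (block : String) (out : Bool) : Decidable (Spec_is_ordered_list block out) := by unfold Spec_is_ordered_list; infer_instance

-- ===== CLAIM (what is proved, stated in full; the proofs are below) =====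
def Claim_equal_is_ordered_list : Prop := ∀ (block : String), Dom_is_ordered_list block → Spec_is_ordered_list block (is_ordered_list block)

-- ===== LEMMAS AND PROOFS =====

-- unfolding equations for splitOn.go
theorem pv_go_zero (sep l cur acc) : PySem.Chars.splitOn.go sep 0 l cur acc = ((cur.reverse ++ l) :: acc).reverse := by
  rw [PySem.Chars.splitOn.go.eq_def]
theorem pv_go_nil (sep f cur acc) : PySem.Chars.splitOn.go sep (f+1) [] cur acc = (cur.reverse :: acc).reverse := by
  rw [PySem.Chars.splitOn.go.eq_def]
theorem pv_go_cons (sep f c rest cur acc) : PySem.Chars.splitOn.go sep (f+1) (c::rest) cur acc =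
    if sep.isPrefixOf (c::rest) then PySem.Chars.splitOn.go sep f (List.drop sep.length (c::rest)) [] (cur.reverse :: acc)
    else PySem.Chars.splitOn.go sep f rest (c :: cur) acc := by
  rw [PySem.Chars.splitOn.go.eq_def]

-- splitOn.go on a nonempty separator that never occurs: it just rebuilds the input
theorem pv_go_no_occ (c : Char) (fuel : Nat) (l cur : List Char) (acc : List (List Char))
    (h : c ∉ l) :
    PySem.Chars.splitOn.go [c] fuel l cur acc = ((cur.reverse ++ l) :: acc).reverse := by
  induction fuel generalizing l cur acc with
  | zero => rw [pv_go_zero]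
  | succ f ih =>
    cases l with
    | nil => rw [pv_go_nil]; simp
    | cons a rest =>
      rw [pv_go_cons]
      have hca : a ≠ c := fun h' => h (h' ▸ List.mem_cons_self)
      have : List.isPrefixOf [c] (a :: rest) = false := by
        simp [List.isPrefixOf, hca.symm]
      rw [if_neg (by simp [this])]
      rw [ih rest (a :: cur) acc (fun hm => h (List.mem_cons_of_mem _ hm))]
      simp

-- splitOn.go never returns fewer than acc.length + 1 pieces
theorem pv_go_len_ge (sep : List Char) (fuel : Nat) (l cur : List Char) (acc : List (List Char)) :
    acc.length + 1 ≤ (PySem.Chars.splitOn.go sep fuel l cur acc).length := by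
  induction fuel generalizing l cur acc with
  | zero => rw [pv_go_zero]; simp
  | succ f ih =>
    cases l with
    | nil => rw [pv_go_nil]; simp
    | cons a rest =>
      rw [pv_go_cons]
      by_cases hp : List.isPrefixOf sep (a :: rest)
      · rw [if_pos hp]
        have := ih (List.drop sep.length (a :: rest)) [] (cur.reverse :: acc)
        simp at this ⊢
        omega
      · rw [if_neg (by simp [hp])]
        exact ih rest (a :: cur) acc

theorem pv_splitOn_no_occ (c : Char) (l : List Char) (h : c ∉ l) :
    PySem.Chars.splitOn l [c] = [l] := by
  unfold PySem.Chars.splitOn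
  rw [pv_go_no_occ c _ l [] [] h]
  simp

theorem pv_go_occ_len (c : Char) (fuel : Nat) (l cur : List Char) (acc : List (List Char))
    (h : c ∈ l) (hfuel : l.length ≤ fuel) :
    acc.length + 2 ≤ (PySem.Chars.splitOn.go [c] fuel l cur acc).length := by
  induction fuel generalizing l cur acc with
  | zero =>
    have : l = [] := by cases l <;> simp_all
    simp [this] at h
  | succ f ih =>
    cases l with
    | nil => simp at h
    | cons a rest =>
      rw [pv_go_cons]
      by_cases hp : List.isPrefixOf [c] (a :: rest)
      · rw [if_pos hp]
        have := pv_go_len_ge [c] f (List.drop [c].length (a :: rest)) [] (cur.reverse :: acc)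
        simp at this ⊢
        omega
      · rw [if_neg (by simp [hp])]
        have hac : a ≠ c := by
          intro h'; exact hp (by simp [List.isPrefixOf, h'])
        have hcr : c ∈ rest := by
          rcases List.mem_cons.mp h with h' | h'
          · exact absurd h'.symm hac
          · exact h'
        exact ih rest (a :: cur) acc hcr (by simp at hfuel; omega)

theorem pv_splitOn_occ_len (c : Char) (l : List Char) (h : c ∈ l) :
    2 ≤ (PySem.Chars.splitOn l [c]).length := by
  unfold PySem.Chars.splitOn
  have := pv_go_occ_len c (l.length + 1) l [] [] h (by omega)
  simpa using this

-- [a, b] is a prefix of l.drop k iff the two lookups match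
theorem pv_two_prefix_head (a b : Char) (m : List Char) :
    [a, b] <+: m ↔ (m[0]? = some a ∧ m[1]? = some b) := by
  cases m with
  | nil => simp
  | cons x t =>
    cases t with
    | nil => simp [List.cons_prefix_cons, eq_comm]
    | cons y t' => simp [List.cons_prefix_cons, eq_comm]

theorem pv_two_prefix (a b : Char) (l : List Char) (k : Nat) :
    [a, b] <+: l.drop k ↔ (l[k]? = some a ∧ l[k+1]? = some b) := by
  rw [pv_two_prefix_head]
  rw [List.getElem?_drop, List.getElem?_drop]
  simp

-- a one-character string is a substring iff the character occurs
theorem pv_singleton_infix (c : Char) (l : List Char) : [c] <:+: l ↔ c ∈ l := by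
  constructor
  · rintro ⟨s, t, rfl⟩; simp
  · intro h
    obtain ⟨s, t, rfl⟩ := List.append_of_mem h
    exact ⟨s, t, by simp⟩

theorem pv_digitRun_take (l : List Char) : (l.take (pvDigitRunLen l)).all PySem.Chars.isdigit := by
  induction l with
  | nil => simp [pvDigitRunLen]
  | cons c rest ih =>
    by_cases h : PySem.Chars.isdigit c
    · simp [pvDigitRunLen, h, ih]
    · simp [pvDigitRunLen, h]

theorem pv_digitRun_eq (l : List Char) (i : Nat) (c : Char)
    (hall : (l.take i).all PySem.Chars.isdigit) (hc : l[i]? = some c)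
    (hnd : PySem.Chars.isdigit c = false) : pvDigitRunLen l = i := by
  induction l generalizing i with
  | nil => simp at hc
  | cons a rest ih =>
    cases i with
    | zero =>
      simp at hc; subst hc
      simp [pvDigitRunLen, hnd]
    | succ j =>
      simp only [List.take_succ_cons, List.all_cons, Bool.and_eq_true] at hall
      simp at hc
      rw [pvDigitRunLen, if_pos hall.1, ih j hall.2 hc]

-- ===== VERDICT (by name: the statement is the Claim_ definition above) =====
set_option maxHeartbeats 1000000 in
theorem is_ordered_list_spec : Claim_equal_is_ordered_list := by
  intro block _
  unfold Spec_is_ordered_list is_ordered_list is_ordered_list_alt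
  have hnlL : ("\n".toList : List Char) = ['\n'] := rfl
  have hdsL : (". ".toList : List Char) = ['.', ' '] := rfl
  by_cases hnl : '\n' ∈ block.toList
  · -- a newline: both sides are false
    have h2 := pv_splitOn_occ_len '\n' block.toList hnl
    have hin : PySem.Str.isIn "\n" block = true := by
      rw [PySem.Str.isIn, hnlL, PySem.Chars.isIn_iff_infix]
      exact (pv_singleton_infix _ _).mpr hnl
    rw [hin, if_pos rfl, if_pos (by rw [hnlL]; omega)]
  · -- single line: line = block.toList
    have hsplit : PySem.Chars.splitOn block.toList "\n".toList = [block.toList] := by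
      rw [hnlL]; exact pv_splitOn_no_occ '\n' block.toList hnl
    have hin : PySem.Str.isIn "\n" block = false := by
      rw [Bool.eq_false_iff]
      intro htrue
      rw [PySem.Str.isIn, hnlL, PySem.Chars.isIn_iff_infix, pv_singleton_infix] at htrue
      exact hnl htrue
    rw [hsplit]
    rw [if_neg (by simp : ¬ (([block.toList] : List (List Char)).length ≠ 1))]
    simp only [List.headD_cons]
    rw [hin]
    simp only [Bool.false_eq_true, if_false]
    set l := block.toList with hl
    set k := pvDigitRunLen l with hk
    set f := PySem.Chars.find l ['.', ' '] with hf
    have hfindeq : PySem.Str.find block ". " = f := by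
      rw [PySem.Str.find, hdsL, ← hl, hf]
    by_cases hocc : ['.', ' '] <:+: l
    · -- the separator occurs somewhere; i is its first occurrence
      have hfpos : 0 ≤ f := (PySem.Chars.find_nonneg_iff l _).mpr hocc
      obtain ⟨hpre, hmin⟩ := PySem.Chars.find_spec hfpos
      set i := f.toNat with hi
      have hdot : l[i]? = some '.' := ((pv_two_prefix _ _ _ _).mp hpre).1
      have hsp : l[i+1]? = some ' ' := ((pv_two_prefix _ _ _ _).mp hpre).2
      obtain ⟨hilen, -⟩ := List.getElem?_eq_some_iff.mp hdot
      have hne : f ≠ -1 := by omega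
      rw [hfindeq, if_neg hne]
      have hnum : (PySem.Str.slice block none (some f)).toList = l.take i := by
        rw [PySem.Str.toList_slice, PySem.Chars.slice_eq_listSlice, ← hl,
          PySem.List.slice_to l hfpos]
      have hrest : (PySem.Str.slice block (some (f + 2)) none).toList = l.drop (i + 2) := by
        rw [PySem.Str.toList_slice, PySem.Chars.slice_eq_listSlice, ← hl,
          PySem.List.slice_from l (by omega : (0:Int) ≤ f + 2)]
        congr 1
        omega
      have hBfin : (PySem.Str.strip (PySem.Str.slice block (some (f + 2)) none) ≠ "") ↔
          PySem.Chars.strip (l.drop (i + 2)) ≠ [] := by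
        rw [← hrest]
        constructor
        · intro h h'
          exact h (String.toList_eq_nil_iff.mp (by rw [PySem.Str.toList_strip, h']))
        · intro h h'
          exact h (by rw [← PySem.Str.toList_strip, h']; rfl)
      have hBdig : PySem.Str.strIsdigit (PySem.Str.slice block none (some f)) =
          PySem.Chars.strIsdigit (l.take i) := by
        rw [PySem.Str.strIsdigit_eq, hnum]
      by_cases hd : PySem.Chars.strIsdigit (l.take i) = true
      · -- digits right up to the first '. ': A's count lands exactly at i
        rw [hBdig, if_neg (not_not_intro hd)]
        have hBval : decide (PySem.Str.strip (PySem.Str.slice block (some (f + 2)) none) ≠ "")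
            = decide (PySem.Chars.strip (l.drop (i + 2)) ≠ []) := by
          simp only [decide_eq_decide]; exact hBfin
        rw [hBval]
        have htake : (l.take i).all PySem.Chars.isdigit := by
          unfold PySem.Chars.strIsdigit at hd
          exact ((Bool.and_eq_true ..).mp hd).2
        have hki : k = i := by
          rw [hk]
          exact pv_digitRun_eq l i '.' htake hdot (by decide)
        rw [if_neg (by omega : ¬ l.length ≤ k)]
        have hget : PySem.List.pyGet? l (k : Int) = some '.' := by
          rw [PySem.List.pyGet?_natCast, hki]; exact hdot
        have hipos : 1 ≤ i := by
          unfold PySem.Chars.strIsdigit at hd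
          have hne' := ((Bool.and_eq_true ..).mp hd).1
          rcases Nat.eq_zero_or_pos i with h0 | h1
          · rw [h0] at hne'; simp at hne'
          · exact h1
        rw [if_neg (by
          push_neg
          exact ⟨by omega, by rw [hget]⟩)]
        have hget1 : PySem.List.pyGet? l ((k : Int) + 1) = some ' ' := by
          rw [show ((k : Int) + 1) = ((k + 1 : Nat) : Int) by push_cast; ring,
            PySem.List.pyGet?_natCast, hki]
          exact hsp
        by_cases hlen : l.length > k + 2
        · rw [if_neg (by omega : ¬ ¬ l.length > k + 2)]
          rw [if_neg (show ¬ (PySem.List.pyGet? l ((k : Int) + 1) ≠ some ' ') from by rw [hget1]; exact fun h => h rfl)]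
          have hkiN : pvDigitRunLen l = i := hk.symm.trans hki
          have hslice : PySem.List.slice l (some ((pvDigitRunLen l : Int) + 2)) none = l.drop (i + 2) := by
            rw [PySem.List.slice_from l (by omega : (0:Int) ≤ (pvDigitRunLen l : Int) + 2), hkiN]
            congr 1
          simp only [hslice]
          simp [List.length_eq_zero_iff]
        · rw [if_pos hlen]
          have hdropnil : l.drop (i + 2) = [] := List.drop_eq_nil_iff.mpr (by omega)
          simp only [hdropnil]
          simp [show PySem.Chars.strip ([] : List Char) = [] from rfl]
      · -- the prefix before the first '. ' is not a nonempty digit run: both reject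
        rw [hBdig, if_pos (show ¬ PySem.Chars.strIsdigit (l.take i) = true from hd)]
        by_cases hklen : l.length ≤ k
        · rw [if_pos hklen]
        · rw [if_neg hklen]
          by_cases hc2 : k = 0 ∨ PySem.List.pyGet? l (k : Int) ≠ some '.'
          · rw [if_pos hc2]
          · rw [if_neg hc2]
            push_neg at hc2
            obtain ⟨hk0, hkdot⟩ := hc2
            rw [PySem.List.pyGet?_natCast] at hkdot
            by_cases hc3 : ¬ l.length > k + 2
            · rw [if_pos hc3]
            · rw [if_neg hc3]
              by_cases hc4 : PySem.List.pyGet? l ((k : Int) + 1) ≠ some ' '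
              · rw [if_pos hc4]
              · exfalso
                push_neg at hc4
                rw [show ((k : Int) + 1) = ((k + 1 : Nat) : Int) by push_cast; ring,
                  PySem.List.pyGet?_natCast] at hc4
                rcases Nat.lt_trichotomy i k with hlt | heq | hgt
                · -- i < k: position i lies in the digit run, yet holds '.'
                  have hdig : PySem.Chars.isdigit '.' = true := by
                    have hmem := pv_digitRun_take l
                    have hti : (l.take k)[i]? = some '.' := by
                      rw [List.getElem?_take_of_lt hlt]; exact hdot
                    exact List.all_eq_true.mp hmem '.' (List.mem_of_getElem? hti)
                  exact absurd hdig (by decide)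
                · -- i = k: the prefix IS a nonempty digit run, contradicting hd
                  apply hd
                  unfold PySem.Chars.strIsdigit
                  rw [Bool.and_eq_true]
                  constructor
                  · rw [heq]
                    simp only [Bool.not_eq_eq_eq_not, Bool.not_true, List.isEmpty_eq_false_iff]
                    rw [List.ne_nil_iff_length_pos, List.length_take]
                    omega
                  · rw [heq]; exact pv_digitRun_take l
                · -- k < i: '. ' already occurs at k, contradicting first-occurrence minimality
                  exact hmin k hgt ((pv_two_prefix _ _ _ _).mpr ⟨hkdot, hc4⟩)
    · -- no '. ' anywhere: B is false, and A cannot pass its '.'-then-space checks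
      have hfneg : f = -1 := (PySem.Chars.find_eq_neg_one_iff l _).mpr hocc
      rw [hfindeq, if_pos hfneg]
      by_cases hklen : l.length ≤ k
      · rw [if_pos hklen]
      · rw [if_neg hklen]
        by_cases hc2 : k = 0 ∨ PySem.List.pyGet? l (k : Int) ≠ some '.'
        · rw [if_pos hc2]
        · rw [if_neg hc2]
          by_cases hc3 : ¬ l.length > k + 2
          · rw [if_pos hc3]
          · rw [if_neg hc3]
            push_neg at hc2 hc3
            obtain ⟨hk0, hkdot⟩ := hc2
            rw [PySem.List.pyGet?_natCast] at hkdot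
            by_cases hc4 : PySem.List.pyGet? l ((k : Int) + 1) ≠ some ' '
            · rw [if_pos hc4]
            · exfalso
              push_neg at hc4
              rw [show ((k : Int) + 1) = ((k + 1 : Nat) : Int) by push_cast; ring,
                PySem.List.pyGet?_natCast] at hc4
              exact hocc (List.infix_iff_prefix_suffix.mpr
                ⟨l.drop k, (pv_two_prefix _ _ _ _).mpr ⟨hkdot, hc4⟩, List.drop_suffix k l⟩)
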